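-- pv_equiv track=rewrite | github.com/charliefiguero/pondshark | parser.py | get_games
-- ===== SOURCE A (Python) =====
-- def get_games(lines):
--     list_of_games = []
--     emptylist = True
--
--     # ignore leading empty lines
--     # while lines[0] == "":
--     #     lines = lines[1:]
--
--     # parse game
--     game = []
--     for line in lines:
--         if line == "\n":
--             continue
--
--         if line.startswith("PokerStars"):
--             if emptylist == True:
--                 emptylist = False
--
--             else:
--                 list_of_games.append(game)
--                 game = list()
--
--         game.append(line)
--
--     list_of_games.append(game)
--     return list_of_games
-- ===== SOURCE B (Python) =====
-- def get_games(lines):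
--     filtered = [l for l in lines if l != "\n"]
--     markers = [i for i, l in enumerate(filtered) if l.startswith("PokerStars")]
--     bounds = [0] + markers[1:] + [len(filtered)]
--     return [filtered[a:b] for a, b in zip(bounds, bounds[1:])]
-- ===== Notes on version B (the rewrite author's own statement) =====
-- stated objective: alternative
-- what changed: Replaces A's single-pass accumulator with a running 'first marker seen' flag by a declarative pipeline: filter out newline lines, list the indices of 'PokerStars' marker lines, and slice the filtered list at every marker position except the first.
import Mathlib
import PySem

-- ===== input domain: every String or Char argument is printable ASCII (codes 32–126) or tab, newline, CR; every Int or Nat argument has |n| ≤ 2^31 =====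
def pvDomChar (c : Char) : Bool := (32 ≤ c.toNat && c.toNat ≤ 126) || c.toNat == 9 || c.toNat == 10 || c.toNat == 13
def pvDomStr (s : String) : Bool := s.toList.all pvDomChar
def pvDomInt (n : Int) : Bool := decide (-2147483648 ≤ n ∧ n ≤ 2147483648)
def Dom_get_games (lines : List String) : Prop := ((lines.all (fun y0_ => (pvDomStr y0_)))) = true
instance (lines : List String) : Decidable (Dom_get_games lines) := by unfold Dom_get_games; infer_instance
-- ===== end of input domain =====

-- B replaces A's one-pass running-flag accumulator by filter + marker-index list + slicing at
-- consecutive bounds (a different decomposition, same cost; objective: alternative).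

-- ===== PORT A =====
-- A-side helper: the body of A's for-loop over (list_of_games, emptylist, game)
def pvStepA (st : List (List String) × Bool × List String) (line : String) :
    List (List String) × Bool × List String :=
  if line == "\n" then st
  else if PySem.Str.startswith line "PokerStars" then
    if st.2.1 then (st.1, false, st.2.2 ++ [line])
    else (st.1 ++ [st.2.2], st.2.1, [line])
  else (st.1, st.2.1, st.2.2 ++ [line])

def get_games (lines : List String) : List (List String) :=
  let st := lines.foldl pvStepA ([], true, [])
  st.1 ++ [st.2.2]

-- ===== PORT B =====
def get_games_alt (lines : List String) : List (List String) :=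
  let filtered := lines.filter (fun l => l != "\n")
  let markers := ((PySem.List.enumerate filtered 0).filter
      (fun p => PySem.Str.startswith p.2 "PokerStars")).map (fun p => p.1)
  let bounds := [(0 : Int)] ++ markers.drop 1 ++ [(filtered.length : Int)]
  (bounds.zip (bounds.drop 1)).map (fun p => PySem.List.slice filtered (some p.1) (some p.2))

-- ===== PRECONDITION & SPEC =====
def Spec_get_games (lines : List String) (out : List (List String)) : Prop := out = get_games_alt lines
instance (lines : List String) (out : List (List String)) : Decidable (Spec_get_games lines out) := by unfold Spec_get_games; infer_instance

-- ===== CLAIM (what is proved, stated in full; the proofs are below) =====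
def Claim_equal_get_games : Prop := ∀ (lines : List String), Dom_get_games lines → Spec_get_games lines (get_games lines)

-- ===== LEMMAS AND PROOFS =====

def pvMk (l : String) : Bool := PySem.Str.startswith l "PokerStars"

-- positions of marker lines
def pvMarkers : List String → List Nat
  | [] => []
  | x :: xs => if pvMk x then 0 :: (pvMarkers xs).map (· + 1) else (pvMarkers xs).map (· + 1)

-- slice fs into groups at absolute cut positions, starting from prev
def pvSg (fs : List String) (prev : Nat) : List Nat → List (List String)
  | [] => [fs.drop prev]
  | c :: cs => (fs.drop prev).take (c - prev) :: pvSg fs c cs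

-- A's loop after the first marker has been seen
def pvChop (g : List String) : List String → List (List String)
  | [] => [g]
  | x :: xs => if pvMk x then g :: pvChop [x] xs else pvChop (g ++ [x]) xs

-- A's loop before the first marker
def pvPre (g : List String) : List String → List (List String)
  | [] => [g]
  | x :: xs => if pvMk x then pvChop (g ++ [x]) xs else pvPre (g ++ [x]) xs

def pvMapHead (f : List String → List String) : List (List String) → List (List String)
  | [] => []
  | h :: t => f h :: t

theorem pvMapHead_comp (f g : List String → List String) (l : List (List String)) :
    pvMapHead f (pvMapHead g l) = pvMapHead (fun x => f (g x)) l := by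
  cases l <;> simp [pvMapHead]

theorem pvMapHead_congr (f g : List String → List String) (l : List (List String))
    (h : ∀ t, f t = g t) : pvMapHead f l = pvMapHead g l := by
  cases l <;> simp [pvMapHead, h]

theorem pvStepA_newline (st : List (List String) × Bool × List String) (l : String)
    (h : (l != "\n") = false) : pvStepA st l = st := by
  simp only [bne, Bool.not_eq_false'] at h
  simp [pvStepA, h]

theorem foldl_filter_newline (lines : List String)
    (st : List (List String) × Bool × List String) :
    lines.foldl pvStepA st = (lines.filter (fun l => l != "\n")).foldl pvStepA st := by
  induction lines generalizing st with
  | nil => rfl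
  | cons x xs ih =>
    by_cases h : (x != "\n") = true
    · simp [h, List.foldl_cons, ih]
    · simp only [Bool.not_eq_true] at h
      simp [h, List.foldl_cons, pvStepA_newline _ _ h, ih]

theorem foldl_chop (xs : List String) (hn : ∀ x ∈ xs, (x != "\n") = true)
    (log : List (List String)) (g : List String) :
    (xs.foldl pvStepA (log, false, g)).1 ++ [(xs.foldl pvStepA (log, false, g)).2.2]
      = log ++ pvChop g xs := by
  induction xs generalizing log g with
  | nil => simp [pvChop]
  | cons x xs ih =>
    have hx : (x != "\n") = true := hn x (by simp)
    have hx' : (x == "\n") = false := by simpa [bne] using hx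
    have hn' : ∀ y ∈ xs, (y != "\n") = true := fun y hy => hn y (by simp [hy])
    by_cases hm : pvMk x
    · have hm' : PySem.Str.startswith x "PokerStars" = true := hm
      simp only [List.foldl_cons, pvStepA, hx', Bool.false_eq_true, if_false, hm', if_true,
        pvChop, pvMk]
      rw [ih hn']
      simp
    · have hm' : PySem.Str.startswith x "PokerStars" = false := by simpa [pvMk] using hm
      simp only [List.foldl_cons, pvStepA, hx', Bool.false_eq_true, if_false, hm', pvChop, pvMk]
      rw [ih hn']

theorem foldl_pre (xs : List String) (hn : ∀ x ∈ xs, (x != "\n") = true)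
    (log : List (List String)) (g : List String) :
    (xs.foldl pvStepA (log, true, g)).1 ++ [(xs.foldl pvStepA (log, true, g)).2.2]
      = log ++ pvPre g xs := by
  induction xs generalizing log g with
  | nil => simp [pvPre]
  | cons x xs ih =>
    have hx : (x != "\n") = true := hn x (by simp)
    have hx' : (x == "\n") = false := by simpa [bne] using hx
    have hn' : ∀ y ∈ xs, (y != "\n") = true := fun y hy => hn y (by simp [hy])
    by_cases hm : pvMk x
    · have hm' : PySem.Str.startswith x "PokerStars" = true := hm
      simp only [List.foldl_cons, pvStepA, hx', Bool.false_eq_true, if_false, hm', if_true,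
        pvPre, pvMk]
      rw [foldl_chop xs hn']
    · have hm' : PySem.Str.startswith x "PokerStars" = false := by simpa [pvMk] using hm
      simp only [List.foldl_cons, pvStepA, hx', Bool.false_eq_true, if_false, hm', pvPre, pvMk]
      rw [ih hn']

theorem chop_mapHead (xs : List String) (g : List String) :
    pvChop g xs = pvMapHead (fun t => g ++ t) (pvChop [] xs) := by
  induction xs generalizing g with
  | nil => simp [pvChop, pvMapHead]
  | cons x xs ih =>
    by_cases hm : pvMk x
    · simp [pvChop, hm, pvMapHead]
    · simp only [pvChop, hm, if_false, Bool.false_eq_true, List.nil_append]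
      rw [ih (g ++ [x]), ih [x], pvMapHead_comp]
      apply pvMapHead_congr
      intro t; simp

theorem pre_mapHead (xs : List String) (g : List String) :
    pvPre g xs = pvMapHead (fun t => g ++ t) (pvPre [] xs) := by
  induction xs generalizing g with
  | nil => simp [pvPre, pvMapHead]
  | cons x xs ih =>
    by_cases hm : pvMk x
    · simp only [pvPre, hm, if_true, List.nil_append]
      rw [chop_mapHead xs (g ++ [x]), chop_mapHead xs [x], pvMapHead_comp]
      apply pvMapHead_congr
      intro t; simp
    · simp only [pvPre, hm, if_false, Bool.false_eq_true, List.nil_append]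
      rw [ih (g ++ [x]), ih [x], pvMapHead_comp]
      apply pvMapHead_congr
      intro t; simp

theorem sg_shift (cs : List Nat) (fs : List String) (x : String) (prev : Nat) :
    pvSg (x :: fs) (prev + 1) (cs.map (· + 1)) = pvSg fs prev cs := by
  induction cs generalizing prev with
  | nil => simp [pvSg]
  | cons c cs ih => simp [pvSg, ih]

theorem sg_shift_top (ms : List Nat) (fs : List String) (x : String) :
    pvSg (x :: fs) 0 (ms.map (· + 1)) = pvMapHead (fun t => x :: t) (pvSg fs 0 ms) := by
  cases ms with
  | nil => simp [pvSg, pvMapHead]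
  | cons c cs => simp [pvSg, pvMapHead, sg_shift]

theorem chop_sg (fs : List String) : pvChop [] fs = pvSg fs 0 (pvMarkers fs) := by
  induction fs with
  | nil => simp [pvChop, pvSg, pvMarkers]
  | cons x xs ih =>
    by_cases hm : pvMk x
    · simp only [pvChop, pvMarkers, hm, if_true, List.nil_append, pvSg, List.drop_zero,
        Nat.sub_self, List.take_zero]
      rw [chop_mapHead xs [x], ih, sg_shift_top]
      exact congrArg _ (pvMapHead_congr _ _ _ (fun t => by simp))
    · simp only [pvChop, pvMarkers, hm, if_false, Bool.false_eq_true, List.nil_append]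
      rw [chop_mapHead xs [x], ih, sg_shift_top]
      exact pvMapHead_congr _ _ _ (fun t => by simp)

theorem pre_sg (fs : List String) : pvPre [] fs = pvSg fs 0 ((pvMarkers fs).drop 1) := by
  induction fs with
  | nil => simp [pvPre, pvSg, pvMarkers]
  | cons x xs ih =>
    by_cases hm : pvMk x
    · simp only [pvPre, pvMarkers, hm, if_true, List.nil_append, List.drop_succ_cons,
        List.drop_zero]
      rw [chop_mapHead xs [x], chop_sg, sg_shift_top]
      exact pvMapHead_congr _ _ _ (fun t => by simp)
    · simp only [pvPre, pvMarkers, hm, if_false, Bool.false_eq_true, List.nil_append]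
      rw [pre_mapHead xs [x], ih, ← List.map_drop, sg_shift_top]
      exact pvMapHead_congr _ _ _ (fun t => by simp)

theorem markers_bridge (fs : List String) (s : Int) :
    (((PySem.List.enumerate fs s).filter (fun p => PySem.Str.startswith p.2 "PokerStars")).map
        (fun p => p.1))
      = (pvMarkers fs).map (fun (i : Nat) => s + (i : Int)) := by
  induction fs generalizing s with
  | nil => simp [PySem.List.enumerate_nil, pvMarkers]
  | cons x xs ih =>
    rw [PySem.List.enumerate_cons]
    by_cases hm : pvMk x
    · have hm' : PySem.Str.startswith x "PokerStars" = true := hm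
      simp only [pvMarkers, hm, if_true, List.filter_cons, hm', List.map_cons, List.map_map,
        ih (s + 1)]
      congr 1
      · simp
      · apply List.map_congr_left
        intro a _
        simp only [Function.comp_apply]
        push_cast
        ring
    · have hm' : PySem.Str.startswith x "PokerStars" = false := by simpa [pvMk] using hm
      simp only [pvMarkers, hm, if_false, Bool.false_eq_true, List.filter_cons, hm',
        List.map_map, ih (s + 1)]
      apply List.map_congr_left
      intro a _
      simp only [Function.comp_apply]
      push_cast
      ring

theorem zip_slice_bridge (cuts : List Nat) (fs : List String) (prev : Nat) :
    ((((prev :: cuts ++ [fs.length]).map (fun (i : Nat) => (i : Int))).zip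
        (((cuts ++ [fs.length]).map (fun (i : Nat) => (i : Int))))).map
      (fun p => PySem.List.slice fs (some p.1) (some p.2)))
      = pvSg fs prev cuts := by
  induction cuts generalizing prev with
  | nil =>
    simp only [List.nil_append, List.singleton_append, List.map_cons, List.map_nil,
      List.zip_cons_cons, List.zip_nil_right, pvSg, PySem.List.slice_natCast]
    rw [List.take_of_length_le (by simp)]
  | cons c cs ih =>
    simp only [List.cons_append, List.map_cons, List.zip_cons_cons, List.map_cons, pvSg]
    rw [PySem.List.slice_natCast]
    exact congrArg _ (ih c)

theorem map_cast_bounds (l : List Nat) (n : Nat) :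
    [(0 : Int)] ++ l.map (fun (i : Nat) => (i : Int)) ++ [(n : Int)]
      = ((0 : Nat) :: (l ++ [n])).map (fun (i : Nat) => (i : Int)) := by
  simp

theorem get_games_alt_eq (lines : List String) :
    get_games_alt lines
      = pvSg (lines.filter (fun l => l != "\n")) 0
          ((pvMarkers (lines.filter (fun l => l != "\n"))).drop 1) := by
  unfold get_games_alt
  simp only
  rw [markers_bridge (lines.filter (fun l => l != "\n")) 0]
  have hfun : (fun (i : Nat) => (0 : Int) + (i : Int)) = (fun (i : Nat) => (i : Int)) := by
    funext i; ring
  rw [hfun, ← List.map_drop, map_cast_bounds]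
  rw [show (((0 : Nat) :: ((pvMarkers (lines.filter (fun l => l != "\n"))).drop 1
        ++ [(lines.filter (fun l => l != "\n")).length])).map (fun (i : Nat) => (i : Int))).drop 1
      = ((pvMarkers (lines.filter (fun l => l != "\n"))).drop 1
        ++ [(lines.filter (fun l => l != "\n")).length]).map (fun (i : Nat) => (i : Int)) from by simp]
  exact zip_slice_bridge ((pvMarkers (lines.filter (fun l => l != "\n"))).drop 1)
      (lines.filter (fun l => l != "\n")) 0

-- ===== VERDICT (by name: the statement is the Claim_ definition above) =====
theorem get_games_spec : Claim_equal_get_games := by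
  intro lines _
  unfold Spec_get_games
  unfold get_games
  simp only
  rw [foldl_filter_newline]
  have hn : ∀ x ∈ lines.filter (fun l => l != "\n"), (x != "\n") = true := by
    intro x hx; exact (List.mem_filter.mp hx).2
  rw [foldl_pre (lines.filter (fun l => l != "\n")) hn [] []]
  rw [pre_sg, get_games_alt_eq]
  simp
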